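-- pv_equiv track=rewrite | github.com/Anirudh-rao/Problem-Solving-With-Python | 5.Pattern Questions/10.DiamondPattern.py | generate_diamond
-- ===== SOURCE A (Python) =====
-- def generate_diamond(n):
--     """
--     Function to return a diamond pattern of '*' of side n as a list of strings.
--
--     Parameters:
--     n (int): The number of rows for the upper part of the diamond.
--
--     Returns:
--     list: A list of strings where each string represents a row of the diamond.
--     """
--     # Your code here
--     diamond = []
--     for i in range(1, n+1):
--         stars =  '*' * (2*i-1)
--         spaces = ' '* (n-i)
--         diamond.append(spaces + stars + spaces)
--     for i in range(n-1, 0,-1):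
--         stars = '*' * (2 * i - 1)
--         spaces = ' ' * (n - i)
--         diamond.append(spaces + stars + spaces)
--     return diamond
-- ===== SOURCE B (Python) =====
-- def generate_diamond(n):
--     """Diamond of '*' of side n: build only the first row explicitly, derive each
--     further top-half row from the previous one by string surgery (trim one leading
--     space, widen the star block by two), then mirror the top half for the bottom."""
--     if n <= 0:
--         return []
--     top = [' ' * (n - 1) + '*' + ' ' * (n - 1)]
--     j = n  # index just past the star block of the last built row
--     for _ in range(n - 1):
--         p = top[-1]
--         top.append(p[1:j] + '**' + p[j + 1:])
--         j += 1
--     return top + top[:-1][::-1]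
-- ===== Notes on version B (the rewrite author's own statement) =====
-- stated objective: alternative
-- what changed: B builds only the first row explicitly, derives each further top-half row from the previous one by slice surgery (trim one leading space, widen the star block by two), and produces the bottom half by mirroring the list of top rows, instead of A's closed-form spaces/stars construction of every row in two triangle loops.
import Mathlib
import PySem

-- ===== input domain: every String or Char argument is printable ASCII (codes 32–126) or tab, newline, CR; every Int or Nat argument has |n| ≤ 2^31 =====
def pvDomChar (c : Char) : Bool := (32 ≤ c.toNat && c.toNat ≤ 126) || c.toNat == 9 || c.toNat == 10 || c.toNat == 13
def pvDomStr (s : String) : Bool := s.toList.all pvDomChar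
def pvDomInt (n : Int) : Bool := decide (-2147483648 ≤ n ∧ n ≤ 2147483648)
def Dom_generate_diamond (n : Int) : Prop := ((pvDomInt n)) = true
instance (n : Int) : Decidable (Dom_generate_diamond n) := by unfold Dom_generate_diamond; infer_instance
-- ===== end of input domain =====

-- B builds only the first row explicitly, derives each further top-half row from the previous
-- one by string surgery, and mirrors the top half for the bottom; objective: alternative.

-- ===== PORT A =====
-- '*' * k is ported as List.replicate k.toNat '*': exact, Python yields '' for k ≤ 0 and toNat clamps likewise.
def generate_diamond (n : Int) : List String :=
  let diamond : List String := []
  let diamond := (PySem.List.pyRange 1 (n + 1) 1).foldl (fun diamond i =>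
    let stars := List.replicate (2 * i - 1).toNat '*'
    let spaces := List.replicate (n - i).toNat ' '
    diamond ++ [String.ofList (spaces ++ stars ++ spaces)]) diamond
  let diamond := (PySem.List.pyRange (n - 1) 0 (-1)).foldl (fun diamond i =>
    let stars := List.replicate (2 * i - 1).toNat '*'
    let spaces := List.replicate (n - i).toNat ' '
    diamond ++ [String.ofList (spaces ++ stars ++ spaces)]) diamond
  diamond

-- ===== PORT B =====
-- Rows are modelled as their code-point lists (List Char) and packed with String.ofList at the
-- end — exact on this domain; the loop variable of 'for _ in range(n-1)' is unused, as in Source B.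
def generate_diamond_alt (n : Int) : List String :=
  if n ≤ 0 then []
  else
    let first : List Char := List.replicate (n - 1).toNat ' ' ++ ['*'] ++ List.replicate (n - 1).toNat ' '
    let st := (List.range (n - 1).toNat).foldl
      (fun (st : List (List Char) × Int) _ =>
        let top := st.1
        let j := st.2
        let p := PySem.List.pyGetD top (-1) []
        (top ++ [PySem.List.slice p (some 1) (some j) ++ ['*', '*']
                  ++ PySem.List.slice p (some (j + 1)) none],
         j + 1))
      ([first], n)
    let top := st.1
    (top ++ ((PySem.List.slice? (PySem.List.slice top none (some (-1))) none none (-1)).getD [])).map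
      String.ofList

-- ===== PRECONDITION & SPEC =====
def Spec_generate_diamond (n : Int) (out : List String) : Prop := out = generate_diamond_alt n
instance (n : Int) (out : List String) : Decidable (Spec_generate_diamond n out) := by unfold Spec_generate_diamond; infer_instance

-- ===== CLAIM (what is proved, stated in full; the proofs are below) =====
def Claim_equal_generate_diamond : Prop := ∀ (n : Int), Dom_generate_diamond n → Spec_generate_diamond n (generate_diamond n)

-- ===== LEMMAS AND PROOFS =====
-- the row of the diamond at triangle level i, as a char list / as a string
def pvRowL (n i : Int) : List Char :=
  List.replicate (n - i).toNat ' ' ++ List.replicate (2 * i - 1).toNat '*'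
    ++ List.replicate (n - i).toNat ' '

def pvRow (n i : Int) : String := String.ofList (pvRowL n i)

theorem generate_diamond_eq_maps (n : Int) :
    generate_diamond n =
      (PySem.List.pyRange 1 (n + 1) 1).map (pvRow n)
        ++ (PySem.List.pyRange (n - 1) 0 (-1)).map (pvRow n) := by
  simp only [generate_diamond]
  rw [PySem.List.foldl_append_singleton_eq_map, PySem.List.foldl_append_singleton_eq_map,
    List.nil_append]
  rfl

-- the string surgery on row i yields row i+1 (pure counting form)
theorem pvSurgeryNat (a b : Nat) (ha : 1 ≤ a) :
    (((List.replicate a ' ' ++ List.replicate b '*' ++ List.replicate a ' ').drop 1).take (a - 1 + b))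
        ++ ['*', '*']
        ++ (List.replicate a ' ' ++ List.replicate b '*' ++ List.replicate a ' ').drop (a + b + 1)
      = List.replicate (a - 1) ' ' ++ List.replicate (b + 2) '*' ++ List.replicate (a - 1) ' ' := by
  obtain ⟨a', rfl⟩ : ∃ a', a = a' + 1 := ⟨a - 1, by omega⟩
  have h1 : (List.replicate (a' + 1) ' ' ++ List.replicate b '*' ++ List.replicate (a' + 1) ' ').drop 1
      = (List.replicate a' ' ' ++ List.replicate b '*') ++ List.replicate (a' + 1) ' ' := by
    simp [List.replicate_succ, List.append_assoc]
  rw [h1]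
  rw [show a' + 1 - 1 + b = (List.replicate a' ' ' ++ List.replicate b '*').length by simp,
    List.take_left]
  have h2 : (List.replicate (a' + 1) ' ' ++ List.replicate b '*' ++ List.replicate (a' + 1) ' ').drop (a' + 1 + b + 1)
      = List.replicate a' ' ' := by
    simp [List.drop_append, List.drop_replicate,
      show a' + 1 + b + 1 - (a' + 1) = b + 1 from by omega,
      show a' + 1 - (a' + 1 + b + 1) = 0 from by omega,
      show b + 1 - b = 1 from by omega]
  rw [h2, show a' + 1 - 1 = a' by omega, show b + 2 = b + 1 + 1 by omega]
  simp [List.replicate_succ', List.append_assoc]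

-- the surgery step of B's loop, on the actual slices
theorem pvSurgery (n i : Int) (h1 : 1 ≤ i) (h2 : i < n) :
    PySem.List.slice (pvRowL n i) (some 1) (some (n + i - 1)) ++ ['*', '*']
        ++ PySem.List.slice (pvRowL n i) (some (n + i)) none
      = pvRowL n (i + 1) := by
  rw [PySem.List.slice_toNat _ (by omega) (by omega), PySem.List.slice_from _ (by omega)]
  have e1 : (n + i - 1).toNat - 1 = (n - i).toNat - 1 + (2 * i - 1).toNat := by omega
  have e2 : (n + i).toNat = (n - i).toNat + (2 * i - 1).toNat + 1 := by omega
  have e3 : (n - (i + 1)).toNat = (n - i).toNat - 1 := by omega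
  have e4 : (2 * (i + 1) - 1).toNat = (2 * i - 1).toNat + 2 := by omega
  simp only [pvRowL, Int.toNat_one, e1, e2, e3, e4]
  exact pvSurgeryNat (n - i).toNat (2 * i - 1).toNat (by omega)

-- invariant of B's loop: after k steps the accumulator holds rows 1 .. k+1 and j = n + k
theorem pvLoop (n : Int) (k : Nat) (hk : (k : Int) ≤ n - 1) :
    (List.range k).foldl
      (fun (st : List (List Char) × Int) _ =>
        let top := st.1
        let j := st.2
        let p := PySem.List.pyGetD top (-1) []
        (top ++ [PySem.List.slice p (some 1) (some j) ++ ['*', '*']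
                  ++ PySem.List.slice p (some (j + 1)) none],
         j + 1))
      ([pvRowL n 1], n)
      = ((PySem.List.pyRange 1 ((k : Int) + 2) 1).map (pvRowL n), n + k) := by
  induction k with
  | zero =>
    rw [show ((0 : Nat) : Int) + 2 = 1 + 1 by omega, PySem.List.pyRange_one_singleton]
    simp
  | succ k ih =>
    have hk' : (k : Int) ≤ n - 1 := by push_cast at hk ⊢; omega
    rw [List.range_succ, List.foldl_append, ih hk']
    simp only [List.foldl_cons, List.foldl_nil]
    rw [show ((k : Int)) + 2 = ((k : Int) + 1) + 1 by ring,
      PySem.List.pyRange_one_succ_right (by omega), List.map_append, List.map_singleton,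
      PySem.List.pyGetD_neg_one_append_singleton]
    have hs := pvSurgery n ((k : Int) + 1) (by omega) (by push_cast at hk ⊢; omega)
    rw [show n + ((k : Int) + 1) - 1 = n + (k : Int) by ring,
        show n + ((k : Int) + 1) = n + (k : Int) + 1 by ring] at hs
    rw [hs]
    simp only [Prod.mk.injEq]
    refine ⟨?_, by push_cast; ring⟩
    rw [show (((k + 1 : Nat) : Int)) + 2 = (((k : Int) + 1) + 1) + 1 by push_cast; ring,
      PySem.List.pyRange_one_succ_right (a := 1) (b := (k : Int) + 1 + 1) (by omega),
      List.map_append, List.map_singleton,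
      PySem.List.pyRange_one_succ_right (a := 1) (b := (k : Int) + 1) (by omega),
      List.map_append, List.map_singleton]

-- ===== VERDICT (by name: the statement is the Claim_ definition above) =====
theorem generate_diamond_spec : Claim_equal_generate_diamond := by
  intro n _
  unfold Spec_generate_diamond
  rw [generate_diamond_eq_maps]
  by_cases hn : n ≤ 0
  · rw [PySem.List.pyRange_one_eq_nil (by omega), PySem.List.pyRange_neg_one_eq_nil (by omega)]
    simp [generate_diamond_alt, hn]
  · push Not at hn
    simp only [generate_diamond_alt, if_neg (by omega : ¬ n ≤ 0)]
    have hfirst : List.replicate (n - 1).toNat ' ' ++ ['*'] ++ List.replicate (n - 1).toNat ' '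
        = pvRowL n 1 := by
      simp only [pvRowL]; rfl
    rw [hfirst, pvLoop n (n - 1).toNat (by omega)]
    dsimp only
    rw [PySem.List.slice_to_neg_one, PySem.List.slice?_none_none_neg_one, Option.getD_some]
    rw [show (((n - 1).toNat : Int)) + 2 = n + 1 by omega]
    have htop : (List.map (pvRowL n) (PySem.List.pyRange 1 (n + 1) 1)).dropLast
        = List.map (pvRowL n) (PySem.List.pyRange 1 n 1) := by
      rw [PySem.List.pyRange_one_succ_right (a := 1) (b := n) (by omega), List.map_append,
        List.map_singleton, List.dropLast_concat]
    rw [htop, PySem.List.pyRange_neg_one_eq_reverse, show (0 : Int) + 1 = 1 by ring,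
      show n - 1 + 1 = n by ring]
    rw [List.map_append, List.map_map, ← List.map_reverse, List.map_map]
    rfl
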